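-- pv_equiv track=rewrite | github.com/Romathonat/RocketLeagueSkillsDetection | seqscout/search_space.py | w_k
-- ===== SOURCE A (Python) =====
-- from math import factorial
--
-- def combination(k, n):
--     if k > n:
--         return 0
--
--     return factorial(n) // (factorial(k) * factorial(n - k))
--
-- def w_k(memo, k, m):
--     result = 0
--
--     for i in range(k):
--         if i in memo:
--             w_i = memo[i]
--         else:
--             w_i = w_k(memo, i, m)
--             memo[i] = w_i
--         result += w_i * combination(k - i, m)
--
--     return result
-- ===== SOURCE B (Python) =====
-- # Iterative bottom-up DP: binomial row C(m, d) built once by the multiplicative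
-- # recurrence, then one array pass -- no recursion, no factorial recomputation.
-- # Performs the same memo insertions (same keys, same order) as the original.
-- def w_k(memo, k, m):
--     n = max(k, 0)
--     coef = [0] * (n + 1)          # coef[d] = C(m, d) for d >= 1; 0 when m < 0 or d > m
--     if m >= 0:
--         c = 1
--         for d in range(1, n + 1):
--             c = c * (m - d + 1) // d
--             coef[d] = c
--     w = []
--     for i in range(n):
--         if i in memo:
--             wi = memo[i]
--         else:
--             wi = sum(w[j] * coef[i - j] for j in range(i))
--             memo[i] = wi
--         w.append(wi)
--     return sum(w[i] * coef[n - i] for i in range(n))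
-- ===== Notes on version B (the rewrite author's own statement) =====
-- stated objective: alternative
-- what changed: Replaces the memoized recursion with an iterative bottom-up DP over an array, and replaces per-term factorial recomputation by building the binomial row C(m,d) once with the multiplicative recurrence C(m,d)=C(m,d-1)*(m-d+1)//d.
import Mathlib
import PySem

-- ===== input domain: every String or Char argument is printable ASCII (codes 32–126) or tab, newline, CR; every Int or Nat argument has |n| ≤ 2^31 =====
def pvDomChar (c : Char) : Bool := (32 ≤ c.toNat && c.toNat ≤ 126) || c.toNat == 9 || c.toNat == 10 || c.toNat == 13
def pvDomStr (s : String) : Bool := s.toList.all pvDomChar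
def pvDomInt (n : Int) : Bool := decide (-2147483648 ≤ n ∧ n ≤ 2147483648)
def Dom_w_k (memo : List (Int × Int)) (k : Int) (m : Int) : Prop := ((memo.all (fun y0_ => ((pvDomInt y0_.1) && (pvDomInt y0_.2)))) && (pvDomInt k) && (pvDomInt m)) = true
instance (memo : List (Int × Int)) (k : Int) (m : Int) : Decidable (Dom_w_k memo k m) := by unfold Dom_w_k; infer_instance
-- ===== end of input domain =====

-- B replaces A's memoized recursion + per-term factorials by a bottom-up array DP with the
-- binomial row built once by the multiplicative recurrence (objective: alternative). Both A and
-- B insert the same missing keys into `memo` in the same order; the theorems are about the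
-- RETURN value.

-- ===== PORT A =====

-- math.factorial; exact on the nonnegative arguments A's `combination` ever reaches
def pyFactorial (n : Int) : Int := (Nat.factorial n.toNat : Int)

def combination (k : Int) (n : Int) : Int :=
  if k > n then 0
  else PySem.Int.floordiv (pyFactorial n) (pyFactorial k * pyFactorial (n - k))

-- the `for i in range(k)` loop of A, threading the mutated dict; A's recursive call
-- `w_k(memo, i, m)` is the inner call `wkLoop m i 0 d 0`
def wkLoop (m : Int) (k : Nat) (i : Nat) (d : PySem.Dict Int Int) (acc : Int) :
    PySem.Dict Int Int × Int :=
  if h : i < k then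
    match d.get? (i : Int) with
    | some w => wkLoop m k (i+1) d (acc + w * combination ((k : Int) - (i : Int)) m)
    | none =>
      let r := wkLoop m i 0 d 0
      wkLoop m k (i+1) (r.1.insert (i : Int) r.2)
        (acc + r.2 * combination ((k : Int) - (i : Int)) m)
  else (d, acc)
termination_by (k, k - i)
decreasing_by
  · exact Prod.Lex.right k (by omega)
  · exact Prod.Lex.left _ _ h
  · exact Prod.Lex.right k (by omega)

def w_k (memo : List (Int × Int)) (k : Int) (m : Int) : Int :=
  (wkLoop m k.toNat 0 (PySem.Dict.mk memo) 0).2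

-- ===== PORT B =====

-- the `for d in range(1, n+1)` coefficient loop of Source B: remaining count, current c, current d
def coefGo (m : Int) : Nat → Int → Nat → List Int
  | 0, _, _ => []
  | rem+1, c, d =>
    let c' := PySem.Int.floordiv (c * (m - (d : Int) + 1)) (d : Int)
    c' :: coefGo m rem c' (d+1)

-- coef[0..n]; all zeros when m < 0 (the `if m >= 0` guard of Source B)
def coefRow (m : Int) (n : Nat) : List Int :=
  if 0 ≤ m then 0 :: coefGo m n 1 1 else List.replicate (n+1) 0

-- the `for i in range(n)` loop of Source B, building the array w front-to-back
-- (Source B's `memo[i] = wi` insertions are unobservable in the return value and not threaded)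
def wkAltGo (d : PySem.Dict Int Int) (coef : List Int) : Nat → Nat → List Int → List Int
  | 0, _, w => w
  | rem+1, i, w =>
    let wi :=
      match d.get? (i : Int) with
      | some v => v
      | none => ((List.range i).map (fun j => w.getD j 0 * coef.getD (i - j) 0)).sum
    wkAltGo d coef rem (i+1) (w ++ [wi])

def w_k_alt (memo : List (Int × Int)) (k : Int) (m : Int) : Int :=
  let n := (max k 0).toNat
  let coef := coefRow m n
  let w := wkAltGo (PySem.Dict.mk memo) coef n 0 []
  ((List.range n).map (fun i => w.getD i 0 * coef.getD (n - i) 0)).sum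

-- ===== PRECONDITION & SPEC =====
def Spec_w_k (memo : List (Int × Int)) (k : Int) (m : Int) (out : Int) : Prop := out = w_k_alt memo k m
instance (memo : List (Int × Int)) (k : Int) (m : Int) (out : Int) : Decidable (Spec_w_k memo k m out) := by unfold Spec_w_k; infer_instance

-- ===== CLAIM (what is proved, stated in full; the proofs are below) =====
def Claim_equal_w_k : Prop := ∀ (memo : List (Int × Int)) (k : Int) (m : Int), Dom_w_k memo k m → Spec_w_k memo k m (w_k memo k m)

-- ===== LEMMAS AND PROOFS =====

-- the common mathematical value: list of the first n w-values, built bottom-up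
def Wlist (d : PySem.Dict Int Int) (m : Int) : Nat → List Int
  | 0 => []
  | n+1 =>
    let w := Wlist d m n
    w ++ [match d.get? (n : Int) with
          | some v => v
          | none => ((List.range n).map (fun j => w.getD j 0 * combination ((n : Int) - (j : Int)) m)).sum]

def wval (d : PySem.Dict Int Int) (m : Int) (i : Nat) : Int := (Wlist d m (i+1)).getD i 0

theorem length_Wlist (d : PySem.Dict Int Int) (m : Int) (n : Nat) : (Wlist d m n).length = n := by
  induction n with
  | zero => rfl
  | succ n ih => simp [Wlist, ih]

theorem Wlist_getD (d : PySem.Dict Int Int) (m : Int) (n i : Nat) (h : i < n) :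
    (Wlist d m n).getD i 0 = wval d m i := by
  induction n with
  | zero => omega
  | succ n ih =>
    rcases Nat.lt_or_ge i n with h' | h'
    · rw [← ih h']
      show (Wlist d m n ++ _).getD i 0 = _
      rw [List.getD_append _ _ _ i (by rw [length_Wlist]; exact h')]
    · have : i = n := by omega
      subst this
      rfl

theorem wval_eq (d : PySem.Dict Int Int) (m : Int) (i : Nat) :
    wval d m i = match d.get? (i : Int) with
      | some v => v
      | none => ((List.range i).map (fun j => wval d m j * combination ((i : Int) - (j : Int)) m)).sum := by
  show ((Wlist d m i) ++ [_]).getD i 0 = _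
  rw [List.getD_append_right _ _ _ i (by rw [length_Wlist])]
  simp only [length_Wlist, Nat.sub_self]
  cases hg : d.get? (i : Int) with
  | some v => simp
  | none =>
    simp only [List.getD_cons_zero]
    congr 1
    exact List.map_congr_left (fun j hj => by
      rw [Wlist_getD d m i j (List.mem_range.mp hj)])

-- the tail Σ_{t=i}^{k-1} wval t · C(k-t, m) that A's loop adds to acc
def segSum (d0 : PySem.Dict Int Int) (m : Int) (k : Nat) (i : Nat) : Int :=
  if h : i < k then
    wval d0 m i * combination ((k : Int) - (i : Int)) m + segSum d0 m k (i+1)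
  else 0
termination_by k - i

theorem segSum_eq (d0 : PySem.Dict Int Int) (m : Int) (k : Nat) :
    ∀ (r i : Nat), k - i = r →
      segSum d0 m k i =
        ((List.range' i r).map (fun j => wval d0 m j * combination ((k : Int) - (j : Int)) m)).sum := by
  intro r
  induction r with
  | zero =>
    intro i h
    rw [segSum]
    have : ¬ i < k := by omega
    simp [this]
  | succ r ih =>
    intro i h
    have hik : i < k := by omega
    rw [segSum]
    simp only [hik, dite_true]
    rw [ih (i+1) (by omega), List.range'_succ]
    simp

-- the dict invariant maintained by A's loop: extra keys hold exactly the wval values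
def Good (d0 d : PySem.Dict Int Int) (m : Int) : Prop :=
  ∀ j : Int, d.get? j = d0.get? j ∨
    (d0.get? j = none ∧ 0 ≤ j ∧ d.get? j = some (wval d0 m j.toNat))

theorem good_refl (d0 : PySem.Dict Int Int) (m : Int) : Good d0 d0 m := fun _ => Or.inl rfl

theorem good_get_some (d0 d : PySem.Dict Int Int) (m : Int) (hG : Good d0 d m) (i : Nat) (w : Int)
    (h : d.get? (i : Int) = some w) : w = wval d0 m i := by
  rcases hG (i : Int) with h1 | ⟨h1, _, h2⟩
  · rw [wval_eq, ← h1, h]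
  · rw [h, Int.toNat_natCast] at h2
    exact Option.some.inj h2

theorem good_get_none (d0 d : PySem.Dict Int Int) (m : Int) (hG : Good d0 d m) (i : Nat)
    (h : d.get? (i : Int) = none) : d0.get? (i : Int) = none := by
  rcases hG (i : Int) with h1 | ⟨h1, _, _⟩
  · rw [← h1, h]
  · exact h1

theorem good_insert (d0 d : PySem.Dict Int Int) (m : Int) (hG : Good d0 d m) (i : Nat)
    (h0 : d0.get? (i : Int) = none) :
    Good d0 (d.insert (i : Int) (wval d0 m i)) m := by
  intro j
  by_cases hj : j = (i : Int)
  · subst hj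
    refine Or.inr ⟨h0, Int.natCast_nonneg i, ?_⟩
    rw [PySem.Dict.get?_insert_self, Int.toNat_natCast]
  · rw [PySem.Dict.get?_insert_of_ne _ _ hj]
    exact hG j

-- A's loop computes acc + segSum, and keeps the invariant
set_option maxHeartbeats 1000000 in
theorem wkLoop_spec (d0 : PySem.Dict Int Int) (m : Int) (k i : Nat) (d : PySem.Dict Int Int)
    (acc : Int) :
    Good d0 d m →
      (wkLoop m k i d acc).2 = acc + segSum d0 m k i ∧ Good d0 (wkLoop m k i d acc).1 m := by
  refine wkLoop.induct m
    (fun k i d acc => Good d0 d m →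
      (wkLoop m k i d acc).2 = acc + segSum d0 m k i ∧ Good d0 (wkLoop m k i d acc).1 m)
    ?_ ?_ ?_ k i d acc
  · intro k i d acc h w hget ih hG
    have hw := good_get_some d0 d m hG i w hget
    have ih' := ih hG
    rw [wkLoop, dif_pos h]
    simp only [hget]
    refine ⟨?_, ih'.2⟩
    have hseg : segSum d0 m k i =
        wval d0 m i * combination ((k : Int) - (i : Int)) m + segSum d0 m k (i+1) := by
      rw [segSum, dif_pos h]
    rw [ih'.1, hseg, hw]
    ring
  · intro k i d acc h hget r ih1 ih2 hG
    have h0 := good_get_none d0 d m hG i hget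
    have ih1' := ih1 hG
    have hr2 : (wkLoop m i 0 d 0).2 = wval d0 m i := by
      rw [ih1'.1, segSum_eq d0 m i i 0 (by omega), ← List.range_eq_range', wval_eq, h0]
      simp
    have hGi : Good d0 ((wkLoop m i 0 d 0).1.insert (i : Int) (wkLoop m i 0 d 0).2) m := by
      rw [hr2]
      exact good_insert d0 _ m ih1'.2 i h0
    have ih2' : (wkLoop m k (i+1) ((wkLoop m i 0 d 0).1.insert (i : Int) (wkLoop m i 0 d 0).2)
          (acc + (wkLoop m i 0 d 0).2 * combination ((k : Int) - (i : Int)) m)).2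
        = (acc + (wkLoop m i 0 d 0).2 * combination ((k : Int) - (i : Int)) m) + segSum d0 m k (i+1)
        ∧ Good d0 (wkLoop m k (i+1) ((wkLoop m i 0 d 0).1.insert (i : Int) (wkLoop m i 0 d 0).2)
            (acc + (wkLoop m i 0 d 0).2 * combination ((k : Int) - (i : Int)) m)).1 m := ih2 hGi
    rw [wkLoop, dif_pos h]
    simp only [hget]
    refine ⟨?_, ih2'.2⟩
    have hseg : segSum d0 m k i =
        wval d0 m i * combination ((k : Int) - (i : Int)) m + segSum d0 m k (i+1) := by
      rw [segSum, dif_pos h]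
    rw [ih2'.1, hseg, hr2]
    ring
  · intro k i d acc h hG
    rw [wkLoop, dif_neg h]
    refine ⟨?_, hG⟩
    have hseg : segSum d0 m k i = 0 := by rw [segSum, dif_neg h]
    rw [hseg]
    simp

theorem w_k_eq_sum (memo : List (Int × Int)) (k : Int) (m : Int) :
    w_k memo k m = ((List.range k.toNat).map
      (fun j => wval (PySem.Dict.mk memo) m j * combination ((k.toNat : Int) - (j : Int)) m)).sum := by
  have h := wkLoop_spec (PySem.Dict.mk memo) m k.toNat 0 (PySem.Dict.mk memo) 0 (good_refl _ m)
  unfold w_k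
  rw [h.1, segSum_eq _ m k.toNat k.toNat 0 (by omega), ← List.range_eq_range']
  simp

-- ----- B side: the coefficient row holds A's binomial values -----

theorem comb_eq_choose (d : Nat) (m : Int) :
    combination (d : Int) m = if 0 ≤ m then (Nat.choose m.toNat d : Int) else 0 := by
  by_cases hm : 0 ≤ m
  · obtain ⟨M, rfl⟩ : ∃ M : Nat, m = (M : Int) := ⟨m.toNat, by omega⟩
    simp only [hm, if_true, Int.toNat_natCast]
    by_cases hdM : d ≤ M
    · have hngt : ¬ ((d : Int) > (M : Int)) := by omega
      rw [combination, if_neg hngt]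
      have h1 : pyFactorial (M : Int) = (Nat.factorial M : Int) := by simp [pyFactorial]
      have h2 : pyFactorial (d : Int) = (Nat.factorial d : Int) := by simp [pyFactorial]
      have h3 : pyFactorial ((M : Int) - (d : Int)) = (Nat.factorial (M - d) : Int) := by
        have hnn : ((M : Int) - (d : Int)).toNat = M - d := by omega
        simp [pyFactorial, hnn]
      rw [h1, h2, h3, ← Nat.cast_mul, PySem.Int.floordiv_natCast,
        ← Nat.choose_eq_factorial_div_factorial hdM]
    · have hgt : (d : Int) > (M : Int) := by omega
      rw [combination, if_pos hgt, Nat.choose_eq_zero_of_lt (by omega), Nat.cast_zero]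
  · have hgt : (d : Int) > m := by omega
    rw [combination, if_pos hgt, if_neg hm]

theorem coef_step (m : Int) (hm : 0 ≤ m) (d : Nat) (hd : 1 ≤ d) :
    PySem.Int.floordiv ((Nat.choose m.toNat (d-1) : Int) * (m - (d : Int) + 1)) (d : Int) =
      (Nat.choose m.toNat d : Int) := by
  obtain ⟨M, rfl⟩ : ∃ M : Nat, m = (M : Int) := ⟨m.toNat, by omega⟩
  simp only [Int.toNat_natCast]
  have key : (Nat.choose M (d-1) : Int) * ((M : Int) - (d : Int) + 1) =
      (Nat.choose M d : Int) * (d : Int) := by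
    by_cases hdM : d ≤ M
    · have h := Nat.choose_succ_right_eq M (d-1)
      rw [Nat.sub_add_cancel hd] at h
      have hc : ((M - (d-1) : Nat) : Int) = (M : Int) - (d : Int) + 1 := by omega
      calc (Nat.choose M (d-1) : Int) * ((M : Int) - (d : Int) + 1)
          = (Nat.choose M (d-1) : Int) * ((M - (d-1) : Nat) : Int) := by rw [hc]
        _ = ((Nat.choose M (d-1) * (M - (d-1)) : Nat) : Int) := by push_cast; ring
        _ = ((Nat.choose M d * d : Nat) : Int) := by rw [← h]
        _ = (Nat.choose M d : Int) * (d : Int) := by push_cast; ring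
    · by_cases hd1 : d = M + 1
      · have hz : (M : Int) - (d : Int) + 1 = 0 := by omega
        rw [hz, Nat.choose_eq_zero_of_lt (show M < d by omega)]
        simp
      · rw [Nat.choose_eq_zero_of_lt (show M < d - 1 by omega),
          Nat.choose_eq_zero_of_lt (by omega)]
        simp
  rw [key, show (Nat.choose M d : Int) * (d : Int) = ((Nat.choose M d * d : Nat) : Int) by
      push_cast; ring,
    PySem.Int.floordiv_natCast, Nat.mul_div_cancel _ (by omega)]

theorem coefGo_spec (m : Int) (hm : 0 ≤ m) :
    ∀ (rem d : Nat), 1 ≤ d →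
      coefGo m rem (Nat.choose m.toNat (d-1) : Int) d =
        (List.range' d rem).map (fun j => (Nat.choose m.toNat j : Int)) := by
  intro rem
  induction rem with
  | zero => intro d _; rfl
  | succ rem ih =>
    intro d hd
    rw [coefGo]
    simp only [coef_step m hm d hd]
    have ihd := ih (d+1) (by omega)
    rw [show d + 1 - 1 = d by omega] at ihd
    rw [ihd, List.range'_succ]
    simp

theorem coefRow_getD (m : Int) (n d : Nat) (h1 : 1 ≤ d) (h2 : d ≤ n) :
    (coefRow m n).getD d 0 = combination (d : Int) m := by
  rw [comb_eq_choose]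
  by_cases hm : 0 ≤ m
  · simp only [hm, if_true, coefRow]
    have hc : (1 : Int) = (Nat.choose m.toNat (1-1) : Int) := by simp
    rw [hc, coefGo_spec m hm n 1 (le_refl 1)]
    rw [show d = (d - 1) + 1 by omega, List.getD_cons_succ]
    rw [List.getD_eq_getElem _ _ (by simp; omega)]
    simp only [List.getElem_map, List.getElem_range']
    rw [show 1 + 1 * (d - 1) = d by omega, show d - 1 + 1 = d by omega]
  · simp only [hm, if_false, coefRow]
    rw [List.getD_eq_getElem _ _ (by simp; omega)]
    simp

-- B's array loop builds exactly Wlist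
theorem wkAltGo_spec (d : PySem.Dict Int Int) (m : Int) (n : Nat) :
    ∀ (rem i : Nat), i + rem = n →
      wkAltGo d (coefRow m n) rem i (Wlist d m i) = Wlist d m n := by
  intro rem
  induction rem with
  | zero =>
    intro i h
    have : i = n := by omega
    subst this
    rfl
  | succ rem ih =>
    intro i h
    rw [wkAltGo]
    have hstep : (Wlist d m i ++
        [match d.get? (i : Int) with
         | some v => v
         | none => ((List.range i).map (fun j => (Wlist d m i).getD j 0 * (coefRow m n).getD (i - j) 0)).sum])
        = Wlist d m (i+1) := by
      show _ = Wlist d m i ++ [_]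
      congr 1
      cases hg : d.get? (i : Int) with
      | some v => simp
      | none =>
        simp only [List.cons.injEq, and_true]
        exact congrArg List.sum (List.map_congr_left (fun j hj => by
          have hji : j < i := List.mem_range.mp hj
          rw [coefRow_getD m n (i - j) (by omega) (by omega),
            show ((i - j : Nat) : Int) = (i : Int) - (j : Int) by omega]))
    simp only [hstep]
    exact ih (i+1) (by omega)

theorem w_k_alt_eq (memo : List (Int × Int)) (k : Int) (m : Int) :
    w_k_alt memo k m =
      ((List.range (max k 0).toNat).map
        (fun i => (wkAltGo (PySem.Dict.mk memo) (coefRow m (max k 0).toNat) (max k 0).toNat 0 []).getD i 0 *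
          (coefRow m (max k 0).toNat).getD ((max k 0).toNat - i) 0)).sum := rfl

-- ===== VERDICT (by name: the statement is the Claim_ definition above) =====
theorem w_k_spec : Claim_equal_w_k := by
  intro memo k m _
  show w_k memo k m = w_k_alt memo k m
  have hn : (max k 0).toNat = k.toNat := by omega
  rw [w_k_eq_sum, w_k_alt_eq, hn]
  have hgo : wkAltGo (PySem.Dict.mk memo) (coefRow m k.toNat) k.toNat 0 [] =
      Wlist (PySem.Dict.mk memo) m k.toNat :=
    wkAltGo_spec (PySem.Dict.mk memo) m k.toNat k.toNat 0 (by omega)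
  rw [hgo]
  refine congrArg List.sum (List.map_congr_left (fun i hi => ?_))
  have hi' := List.mem_range.mp hi
  rw [Wlist_getD _ _ _ _ hi', coefRow_getD m k.toNat (k.toNat - i) (by omega) (by omega),
    show ((k.toNat - i : Nat) : Int) = (k.toNat : Int) - (i : Int) by omega]
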